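-- pv_equiv track=rewrite | github.com/blossom22/3_Programmers_school__study | lv1_026.py | solution
-- ===== SOURCE A (Python) =====
-- def solution(price, money, count):
--     a = price
--     for i in range(count):
--         price = a * (i+1)
--         money -= price
--     if money >= 0:
--         return 0
--     else:
--         return abs(money)
-- ===== SOURCE B (Python) =====
-- def solution(price, money, count):
--     n = count if count > 0 else 0
--     total = price * n * (n + 1) // 2
--     shortfall = total - money
--     return shortfall if shortfall > 0 else 0
-- ===== Notes on version B (the rewrite author's own statement) =====
-- stated objective: faster
-- what changed: Replaces the O(count) accumulation loop with the arithmetic-series closed form price*count*(count+1)//2 and a single max-with-zero.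
import Mathlib
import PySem

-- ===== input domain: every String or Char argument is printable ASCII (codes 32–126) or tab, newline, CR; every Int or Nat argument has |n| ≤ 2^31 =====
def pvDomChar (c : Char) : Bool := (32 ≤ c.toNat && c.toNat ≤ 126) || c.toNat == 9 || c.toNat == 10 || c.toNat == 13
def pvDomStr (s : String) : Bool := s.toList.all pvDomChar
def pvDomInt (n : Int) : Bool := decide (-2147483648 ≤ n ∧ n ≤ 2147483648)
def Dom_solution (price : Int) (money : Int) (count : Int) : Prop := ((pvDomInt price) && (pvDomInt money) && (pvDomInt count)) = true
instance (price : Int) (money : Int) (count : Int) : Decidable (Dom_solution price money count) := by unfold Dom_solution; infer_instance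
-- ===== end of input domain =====

-- B replaces A's O(count) loop with the closed-form arithmetic series; return values agree everywhere.
-- ===== PORT A =====
def solution (price : Int) (money : Int) (count : Int) : Int :=
  let a := price
  let money2 := (PySem.List.pyRange 0 count 1).foldl (fun m i => m - a * (i + 1)) money
  if money2 ≥ 0 then 0 else |money2|

-- ===== PORT B =====
def solution_alt (price : Int) (money : Int) (count : Int) : Int :=
  let n := if count > 0 then count else 0
  let total := PySem.Int.floordiv (price * n * (n + 1)) 2
  let shortfall := total - money
  if shortfall > 0 then shortfall else 0

-- ===== PRECONDITION & SPEC =====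
def Spec_solution (price : Int) (money : Int) (count : Int) (out : Int) : Prop := out = solution_alt price money count
instance (price : Int) (money : Int) (count : Int) (out : Int) : Decidable (Spec_solution price money count out) := by unfold Spec_solution; infer_instance

-- ===== CLAIM (what is proved, stated in full; the proofs are below) =====
def Claim_equal_solution : Prop := ∀ (price : Int) (money : Int) (count : Int), Dom_solution price money count → Spec_solution price money count (solution price money count)

-- ===== LEMMAS AND PROOFS =====

-- A's loop subtracts a*(1+2+...+n): closed form with exact division by 2.
theorem foldl_series (a : Int) (n : Nat) (m : Int) :
    List.foldl (fun (m : Int) (k : Nat) => m - a * ((k : Int) + 1)) m (List.range n)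
      = m - a * (((n : Int) * ((n : Int) + 1)) / 2) := by
  induction n generalizing m with
  | zero => simp
  | succ n ih =>
    rw [List.range_succ, List.foldl_append, ih]
    simp only [List.foldl_cons, List.foldl_nil]
    obtain ⟨t, ht⟩ := (Int.even_mul_succ_self (n : Int)).two_dvd
    obtain ⟨u, hu⟩ := (Int.even_mul_succ_self ((n : Int) + 1)).two_dvd
    push_cast
    rw [ht, hu, Int.mul_ediv_cancel_left t (by norm_num), Int.mul_ediv_cancel_left u (by norm_num)]
    have : u = t + ((n : Int) + 1) := by nlinarith [ht, hu]
    rw [this]; ring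

theorem solution_spec : Claim_equal_solution := by
  intro price money count _
  unfold Spec_solution solution solution_alt
  by_cases hc : count > 0
  · rw [PySem.List.pyRange_one]
    simp only [sub_zero, zero_add, List.foldl_map]
    rw [foldl_series]
    have hn : ((count.toNat : Int)) = count := Int.toNat_of_nonneg (le_of_lt hc)
    rw [hn, if_pos hc]
    obtain ⟨t, ht⟩ := (Int.even_mul_succ_self count).two_dvd
    have hfd : PySem.Int.floordiv (price * count * (count + 1)) 2 = price * t := by
      have h2 : price * count * (count + 1) = 2 * (price * t) := by rw [mul_assoc, ht]; ring
      rw [h2, PySem.Int.floordiv]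
      exact Int.mul_fdiv_cancel_left _ (by norm_num)
    rw [hfd, ht, Int.mul_ediv_cancel_left t (by norm_num)]
    by_cases hm : money - price * t ≥ 0
    · rw [if_pos hm, if_neg (by omega)]
    · rw [if_neg hm, if_pos (by omega), abs_of_neg (by omega)]; ring
  · have hnil : PySem.List.pyRange 0 count 1 = [] := by
      rw [PySem.List.pyRange_one]
      have h0 : (count - 0).toNat = 0 := by omega
      rw [h0]; simp
    rw [hnil, if_neg hc]
    simp only [List.foldl_nil]
    have hfd : PySem.Int.floordiv (price * 0 * (0 + 1)) 2 = 0 := by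
      simp [PySem.Int.floordiv]
    rw [hfd]
    by_cases hm : money ≥ 0
    · rw [if_pos hm, if_neg (by omega)]
    · rw [if_neg hm, if_pos (by omega), abs_of_neg (by omega)]; ring
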